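-- pv_equiv track=rewrite | github.com/nju-websoft/FormulaReasoning | baselines/MCTS-PRM/node.py | extract_pred_answer
-- ===== SOURCE A (Python) =====
-- def extract_pred_answer(pred_str):
--     pred = ""
--     if "boxed" in pred_str:
--         ans = pred_str.split("boxed")[-1]
--         if len(ans) == 0:
--             return ""
--         elif ans[0] == "{":
--             stack = 1
--             a = ""
--             for c in ans[1:]:
--                 if c == "{":
--                     stack += 1
--                     a += c
--                 elif c == "}":
--                     stack -= 1
--                     if stack == 0:
--                         break
--                     a += c
--                 else:
--                     a += c
--         else:
--             a = ans.split("$")[0].strip()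
--         pred = a
--     return pred
-- ===== SOURCE B (Python) =====
-- def _brace_content(ans):
--     depth = 0
--     for j, c in enumerate(ans):
--         if c == "{":
--             depth += 1
--         elif c == "}":
--             depth -= 1
--             if depth == 0:
--                 return ans[1:j]
--     return ans[1:]
--
--
-- def _dollar_head(ans):
--     d = ans.find("$")
--     return (ans if d == -1 else ans[:d]).strip()
--
--
-- def extract_pred_answer(pred_str):
--     if "boxed" not in pred_str:
--         return ""
--     *_, ans = pred_str.split("boxed")
--     if not ans:
--         return ""
--     return _brace_content(ans) if ans.startswith("{") else _dollar_head(ans)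
-- ===== Notes on version B (the rewrite author's own statement) =====
-- stated objective: simpler
-- what changed: B is decomposed into small helpers built on different primitives: star-unpacking the last split segment, startswith instead of indexing the first character, str.find of the dollar sign with a prefix slice instead of splitting on it, and an index-returning depth scan over the whole remainder (returning a slice from inside the loop) instead of A's char-by-char accumulator loop.
import Mathlib
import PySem

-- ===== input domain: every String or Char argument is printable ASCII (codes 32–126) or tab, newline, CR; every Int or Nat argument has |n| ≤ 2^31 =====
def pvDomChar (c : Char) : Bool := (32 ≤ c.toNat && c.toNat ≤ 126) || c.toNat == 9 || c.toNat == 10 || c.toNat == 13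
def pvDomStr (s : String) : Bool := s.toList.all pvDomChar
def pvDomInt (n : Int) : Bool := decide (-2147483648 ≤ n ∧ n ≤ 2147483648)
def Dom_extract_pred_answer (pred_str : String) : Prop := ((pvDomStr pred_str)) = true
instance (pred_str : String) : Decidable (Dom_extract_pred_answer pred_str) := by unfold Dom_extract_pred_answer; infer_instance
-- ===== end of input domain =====

-- B restructures A into small helpers built on different primitives: the last split segment by
-- star-unpacking, startswith instead of indexing ans[0], find('$') with a prefix slice instead of
-- split('$')[0], and an index-returning depth scan (one slice on return) instead of A's
-- char-by-char accumulator loop (objective: simpler).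

-- ===== PORT A =====
-- the accumulator for-loop of A's '{' branch: stack counter, accumulated chars, remaining chars
def pvALoop : Int → List Char → List Char → List Char
  | _, a, [] => a
  | stack, a, c :: cs =>
    if c = '{' then pvALoop (stack + 1) (a ++ [c]) cs
    else if c = '}' then
      (if stack - 1 = 0 then a else pvALoop (stack - 1) (a ++ [c]) cs)
    else pvALoop stack (a ++ [c]) cs

def extract_pred_answer (pred_str : String) : String :=
  if PySem.Str.isIn "boxed" pred_str then
    -- ans = pred_str.split("boxed")[-1]; split never returns [], so the [-1] lookup never misses
    let ans := (PySem.List.pyGet? (PySem.Chars.splitOn pred_str.toList "boxed".toList) (-1)).getD []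
    if ans.length = 0 then ""
    else if PySem.List.pyGet? ans 0 = some '{' then
      String.ofList (pvALoop 1 [] (PySem.List.slice ans (some 1) none))
    else
      -- a = ans.split("$")[0].strip(); split never returns [], so the [0] lookup never misses
      String.ofList (PySem.Chars.strip ((PySem.List.pyGet? (PySem.Chars.splitOn ans ['$']) 0).getD []))
  else ""

-- ===== PORT B =====
-- the enumerate loop of _brace_content: only a depth counter; some j = index where depth hits 0
def pvScan : Int → Nat → List Char → Option Nat
  | _, _, [] => none
  | depth, j, c :: cs =>
    if c = '{' then pvScan (depth + 1) (j + 1) cs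
    else if c = '}' then
      (if depth - 1 = 0 then some j else pvScan (depth - 1) (j + 1) cs)
    else pvScan depth (j + 1) cs

-- _brace_content: returns ans[1:j] from inside the loop, ans[1:] on fall-through
def pvBraceContent (ans : List Char) : List Char :=
  match pvScan 0 0 ans with
  | some j => PySem.List.slice ans (some 1) (some (j : Int))
  | none => PySem.List.slice ans (some 1) none

-- _dollar_head: d = ans.find("$"); (ans if d == -1 else ans[:d]).strip()
def pvDollarHead (ans : List Char) : List Char :=
  let d := PySem.Chars.find ans ['$']
  PySem.Chars.strip (if d = -1 then ans else PySem.List.slice ans none (some d))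

def extract_pred_answer_alt (pred_str : String) : String :=
  if !(PySem.Str.isIn "boxed" pred_str) then ""
  else
    -- *_, ans = pred_str.split("boxed") : the last element of a never-empty split list
    let ans := ((PySem.Chars.splitOn pred_str.toList "boxed".toList).getLast?).getD []
    if ans = [] then ""
    else if PySem.Chars.startswith ans ['{'] then String.ofList (pvBraceContent ans)
    else String.ofList (pvDollarHead ans)

-- ===== PRECONDITION & SPEC =====
def Spec_extract_pred_answer (pred_str : String) (out : String) : Prop := out = extract_pred_answer_alt pred_str
instance (pred_str : String) (out : String) : Decidable (Spec_extract_pred_answer pred_str out) := by unfold Spec_extract_pred_answer; infer_instance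

-- ===== CLAIM =====
def Claim_equal_extract_pred_answer : Prop := ∀ (pred_str : String), Dom_extract_pred_answer pred_str → Spec_extract_pred_answer pred_str (extract_pred_answer pred_str)

-- ===== LEMMAS AND PROOFS =====

-- first segment of a split: chars before the first occurrence of sep
def pvFirstSeg (sep : List Char) : List Char → List Char
  | [] => []
  | c :: rest => if sep.isPrefixOf (c :: rest) then [] else c :: pvFirstSeg sep rest

theorem pvScan_ge : ∀ (cs : List Char) (d : Int) (j k : Nat), pvScan d j cs = some k → j ≤ k := by
  intro cs
  induction cs with
  | nil => intro d j k h; simp [pvScan] at h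
  | cons c cs ih =>
    intro d j k h
    simp only [pvScan] at h
    split_ifs at h with h1 h2 h3
    · exact Nat.le_of_succ_le (ih _ _ _ h)
    · exact le_of_eq (Option.some.inj h)
    · exact Nat.le_of_succ_le (ih _ _ _ h)
    · exact Nat.le_of_succ_le (ih _ _ _ h)

theorem pvALoop_eq_scan : ∀ (cs : List Char) (stack : Int) (acc : List Char) (j : Nat),
    pvALoop stack acc cs
      = acc ++ (match pvScan stack j cs with
                | some k => cs.take (k - j)
                | none => cs) := by
  intro cs
  induction cs with
  | nil => intro stack acc j; simp [pvALoop, pvScan]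
  | cons c cs ih =>
    intro stack acc j
    simp only [pvALoop, pvScan]
    split_ifs with h1 h2 h3
    · rw [ih (stack + 1) (acc ++ [c]) (j + 1)]
      cases hs : pvScan (stack + 1) (j + 1) cs with
      | none => simp
      | some k =>
        have := pvScan_ge cs (stack + 1) (j + 1) k hs
        have hk : k - j = (k - (j + 1)) + 1 := by omega
        simp [hk, List.take_succ_cons]
    · simp
    · rw [ih (stack - 1) (acc ++ [c]) (j + 1)]
      cases hs : pvScan (stack - 1) (j + 1) cs with
      | none => simp
      | some k =>
        have := pvScan_ge cs (stack - 1) (j + 1) k hs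
        have hk : k - j = (k - (j + 1)) + 1 := by omega
        simp [hk, List.take_succ_cons]
    · rw [ih stack (acc ++ [c]) (j + 1)]
      cases hs : pvScan stack (j + 1) cs with
      | none => simp
      | some k =>
        have := pvScan_ge cs stack (j + 1) k hs
        have hk : k - j = (k - (j + 1)) + 1 := by omega
        simp [hk, List.take_succ_cons]

theorem splitOn_go_first : ∀ (fuel : Nat) (l cur sep : List Char) (acc : List (List Char)),
    sep ≠ [] → l.length < fuel →
    ∃ rest, PySem.Chars.splitOn.go sep fuel l cur acc
      = acc.reverse ++ (cur.reverse ++ pvFirstSeg sep l) :: rest := by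
  intro fuel
  induction fuel with
  | zero => intro l cur sep acc _ h; omega
  | succ f ih =>
    intro l cur sep acc hsep hlen
    cases l with
    | nil =>
      refine ⟨[], ?_⟩
      rw [PySem.Chars.splitOn.go]
      all_goals simp [pvFirstSeg]
    | cons c rest =>
      by_cases hp : sep.isPrefixOf (c :: rest) = true
      · rw [PySem.Chars.splitOn.go]
        simp only [hp, if_true]
        have hlen' : (List.drop sep.length (c :: rest)).length < f := by
          have : 1 ≤ sep.length := by cases sep with | nil => exact absurd rfl hsep | cons a b => simp
          simp only [List.length_drop, List.length_cons] at *
          omega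
        obtain ⟨r, hr⟩ := ih (List.drop sep.length (c :: rest)) [] sep (cur.reverse :: acc) hsep hlen'
        refine ⟨pvFirstSeg sep (List.drop sep.length (c :: rest)) :: r, ?_⟩
        rw [hr]
        simp [pvFirstSeg, hp]
      · rw [PySem.Chars.splitOn.go]
        simp only [hp, if_false, Bool.false_eq_true]
        have hlen' : rest.length < f := by simp at hlen; omega
        obtain ⟨r, hr⟩ := ih rest (c :: cur) sep acc hsep hlen'
        refine ⟨r, ?_⟩
        rw [hr]
        simp [pvFirstSeg, hp]

theorem splitOn_head (s sep : List Char) (h : sep ≠ []) :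
    (PySem.List.pyGet? (PySem.Chars.splitOn s sep) 0).getD [] = pvFirstSeg sep s := by
  obtain ⟨rest, hr⟩ := splitOn_go_first (s.length + 1) s [] sep [] h (by omega)
  unfold PySem.Chars.splitOn
  rw [hr]
  simp [PySem.List.pyGet?, PySem.List.pyIdx?]

theorem find_go_shift : ∀ (l sub : List Char) (k : Nat), sub ≠ [] →
    PySem.Chars.find.go sub l k
      = if PySem.Chars.find.go sub l 0 = -1 then -1 else PySem.Chars.find.go sub l 0 + k := by
  intro l
  induction l with
  | nil =>
    intro sub k hsub
    rw [PySem.Chars.find.go, PySem.Chars.find.go]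
    simp [List.isEmpty_iff, hsub]
  | cons c t ih =>
    intro sub k hsub
    by_cases hp : sub.isPrefixOf (c :: t) = true
    · rw [PySem.Chars.find.go, PySem.Chars.find.go]
      simp [hp]
    · have h1 : PySem.Chars.find.go sub (c :: t) k = PySem.Chars.find.go sub t (k + 1) := by
        rw [PySem.Chars.find.go]; simp [hp]
      have h0 : PySem.Chars.find.go sub (c :: t) 0 = PySem.Chars.find.go sub t 1 := by
        rw [PySem.Chars.find.go]; simp [hp]
      have hge : -1 ≤ PySem.Chars.find.go sub t 0 := by
        have := PySem.Chars.neg_one_le_find t sub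
        simpa [PySem.Chars.find] using this
      rw [h1, h0, ih sub (k + 1) hsub, ih sub 1 hsub]
      by_cases hz : PySem.Chars.find.go sub t 0 = -1
      · simp [hz]
      · have : PySem.Chars.find.go sub t 0 + 1 ≠ -1 := by omega
        simp [hz, this]
        omega

theorem pvFirstSeg_eq_find (sep : List Char) (hsep : sep ≠ []) : ∀ l : List Char,
    pvFirstSeg sep l
      = (if PySem.Chars.find l sep = -1 then l else l.take (PySem.Chars.find l sep).toNat) := by
  intro l
  induction l with
  | nil =>
    have : PySem.Chars.find [] sep = -1 := by
      unfold PySem.Chars.find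
      rw [PySem.Chars.find.go]
      simp [List.isEmpty_iff, hsep]
    simp [pvFirstSeg, this]
  | cons c t ih =>
    by_cases hp : sep.isPrefixOf (c :: t) = true
    · have h0 : PySem.Chars.find (c :: t) sep = 0 := by
        unfold PySem.Chars.find
        rw [PySem.Chars.find.go]
        simp [hp]
      simp [pvFirstSeg, hp, h0]
    · have h0 : PySem.Chars.find (c :: t) sep = PySem.Chars.find.go sep t 1 := by
        unfold PySem.Chars.find
        rw [PySem.Chars.find.go]
        simp [hp]
      have hge : -1 ≤ PySem.Chars.find t sep := PySem.Chars.neg_one_le_find t sep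
      have hfind : PySem.Chars.find t sep = PySem.Chars.find.go sep t 0 := rfl
      rw [find_go_shift t sep 1 hsep] at h0
      have hseg : pvFirstSeg sep (c :: t) = c :: pvFirstSeg sep t := by
        simp [pvFirstSeg, hp]
      by_cases hz : PySem.Chars.find t sep = -1
      · rw [hfind] at hz
        simp only [hz, if_true] at h0
        have hzf : PySem.Chars.find t sep = -1 := by rw [hfind]; exact hz
        rw [hseg, ih, if_pos hzf, if_pos h0]
      · have hzg : ¬ PySem.Chars.find.go sep t 0 = -1 := by rw [← hfind]; exact hz
        simp only [hzg, if_false] at h0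
        have hge0 : 0 ≤ PySem.Chars.find t sep := by omega
        have h0' : PySem.Chars.find (c :: t) sep = PySem.Chars.find t sep + 1 := by
          rw [h0, ← hfind]; norm_num
        have hne : ¬ PySem.Chars.find (c :: t) sep = -1 := by rw [h0']; omega
        have htn : (PySem.Chars.find t sep + 1).toNat = (PySem.Chars.find t sep).toNat + 1 := by
          omega
        rw [hseg, ih, if_neg hz, if_neg hne, h0', htn, List.take_succ_cons]

theorem dollar_eq (ans : List Char) :
    PySem.Chars.strip ((PySem.List.pyGet? (PySem.Chars.splitOn ans ['$']) 0).getD [])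
      = pvDollarHead ans := by
  unfold pvDollarHead
  rw [splitOn_head ans ['$'] (by simp), pvFirstSeg_eq_find ['$'] (by simp) ans]
  by_cases hz : PySem.Chars.find ans ['$'] = -1
  · simp [hz]
  · have hge : -1 ≤ PySem.Chars.find ans ['$'] := PySem.Chars.neg_one_le_find ans ['$']
    have h0 : 0 ≤ PySem.Chars.find ans ['$'] := by omega
    simp [hz, PySem.List.slice_to _ h0]

-- ===== VERDICT =====
-- ===== VERDICT =====
theorem extract_pred_answer_spec : Claim_equal_extract_pred_answer := by
  intro s _
  unfold Spec_extract_pred_answer extract_pred_answer extract_pred_answer_alt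
  by_cases hb : PySem.Str.isIn "boxed" s = true
  · rw [hb]
    simp only [Bool.not_true, Bool.false_eq_true, if_false, if_true]
    rw [PySem.List.pyGet?_neg_one]
    set ans := ((PySem.Chars.splitOn s.toList "boxed".toList).getLast?).getD [] with hans
    clear_value ans
    cases ans with
    | nil => simp
    | cons a t =>
      have hlen : ¬ (a :: t).length = 0 := by simp
      by_cases hbr : a = '{'
      · subst hbr
        have hidx : PySem.List.pyGet? ('{' :: t) 0 = some '{' := by
          simp [PySem.List.pyGet?, PySem.List.pyIdx?]
        have hsw : PySem.Chars.startswith ('{' :: t) ['{'] = true := by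
          simp [PySem.Chars.startswith, List.isPrefixOf]
        simp only [hlen, if_false, hidx, if_true, hsw, reduceCtorEq]
        unfold pvBraceContent
        have hscan : pvScan 0 0 ('{' :: t) = pvScan 1 1 t := by
          simp [pvScan]
        rw [hscan, PySem.List.slice_from_one, List.tail_cons,
          pvALoop_eq_scan t 1 [] 1]
        cases hs : pvScan 1 1 t with
        | none => simp
        | some k =>
          have hk1 : PySem.List.slice ('{' :: t) (some 1) (some (k : Int))
              = (('{' :: t).drop 1).take (k - 1) := by
            have := PySem.List.slice_natCast ('{' :: t) 1 k
            simpa using this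
          simp [hk1]
      · have hidx : PySem.List.pyGet? (a :: t) 0 = some a := by
          simp [PySem.List.pyGet?, PySem.List.pyIdx?]
        have hsw : PySem.Chars.startswith (a :: t) ['{'] = false := by
          simp [PySem.Chars.startswith, List.isPrefixOf]
          intro h; exact absurd h.symm hbr
        have hne : ¬ (PySem.List.pyGet? (a :: t) 0 = some '{') := by
          rw [hidx]; simp; exact hbr
        simp only [hlen, if_false, hne, hsw, Bool.false_eq_true]
        rw [dollar_eq]
        simp
  · have hb' : PySem.Str.isIn "boxed" s = false := by simpa using hb
    rw [hb']
    simp
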